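-- pv_equiv track=rewrite | github.com/AmbeHw/StanCode | lecture08/change_digit_to_ch.py | digit_to_ch
-- ===== SOURCE A (Python) =====
-- def digit_to_ch(s):
--     st = str()
--     for i in range(len(s)):
--         if 49 <= ord(s[i]) <= 57:
--             st += chr(ord(s[i]) + 16)
--         else:
--             st += s[i]
--     return st
-- ===== SOURCE B (Python) =====
-- def digit_to_ch(s):
--     for d in range(49, 58):
--         s = s.replace(chr(d), chr(d + 16))
--     return s
-- ===== Notes on version B (the rewrite author's own statement) =====
-- stated objective: alternative
-- what changed: Replaces the single index-by-index loop with per-char if/else branching and repeated concatenation by nine staged whole-string replace passes, one per digit codepoint 49..57; correct because each target char (65..73) is outside the digit range so later passes never re-touch earlier substitutions.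
import Mathlib
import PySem

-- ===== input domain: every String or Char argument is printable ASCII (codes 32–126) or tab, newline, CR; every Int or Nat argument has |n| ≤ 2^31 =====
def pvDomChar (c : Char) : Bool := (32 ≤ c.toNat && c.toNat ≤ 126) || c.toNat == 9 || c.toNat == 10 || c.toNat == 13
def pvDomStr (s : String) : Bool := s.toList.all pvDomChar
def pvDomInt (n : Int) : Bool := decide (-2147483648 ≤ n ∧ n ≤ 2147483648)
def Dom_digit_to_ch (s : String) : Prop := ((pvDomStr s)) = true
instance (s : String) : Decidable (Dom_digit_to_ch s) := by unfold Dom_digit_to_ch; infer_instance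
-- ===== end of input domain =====

-- B replaces the per-index branching loop by nine staged whole-string replace passes, one per digit (alternative decomposition).

-- ===== PORT A =====
def digit_to_ch (s : String) : String :=
  let cs := s.toList
  String.ofList ((PySem.List.pyRange 0 (cs.length : Int) 1).foldl
    (fun st i =>
      let c := PySem.List.pyGetD cs i ' '
      if 49 ≤ c.toNat ∧ c.toNat ≤ 57 then st ++ [Char.ofNat (c.toNat + 16)]
      else st ++ [c]) [])

-- ===== PORT B =====
-- for d in range(49, 58): s = s.replace(chr(d), chr(d + 16))
def digit_to_ch_alt (s : String) : String :=
  (PySem.List.pyRange 49 58 1).foldl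
    (fun t d => PySem.Str.replace t (String.ofList [Char.ofNat d.toNat]) (String.ofList [Char.ofNat (d.toNat + 16)])) s

-- ===== PRECONDITION & SPEC =====
def Spec_digit_to_ch (s : String) (out : String) : Prop := out = digit_to_ch_alt s
instance (s : String) (out : String) : Decidable (Spec_digit_to_ch s out) := by unfold Spec_digit_to_ch; infer_instance

-- ===== CLAIM =====
def Claim_equal_digit_to_ch : Prop := ∀ (s : String), Dom_digit_to_ch s → Spec_digit_to_ch s (digit_to_ch s)

-- ===== LEMMAS AND PROOFS =====

-- single-char replace is a map
theorem replace_go_single (a b : Char) : ∀ (fuel : Nat) (l acc : List Char), l.length ≤ fuel →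
    PySem.Chars.replace.go [a] [b] fuel l acc =
      acc.reverse ++ l.map (fun c => if c = a then b else c) := by
  intro fuel
  induction fuel with
  | zero =>
      intro l acc h
      have : l = [] := List.length_eq_zero_iff.mp (Nat.le_zero.mp h)
      subst this
      simp [PySem.Chars.replace.go]
  | succ n ih =>
      intro l acc h
      cases l with
      | nil => simp [PySem.Chars.replace.go]
      | cons c t =>
          by_cases hc : c = a
          · subst hc
            have hp : List.isPrefixOf [c] (c :: t) = true := by
              simp [List.isPrefixOf]
            simp only [PySem.Chars.replace.go, hp, if_pos]
            rw [show List.drop [c].length (c :: t) = t from rfl]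
            rw [ih t _ (by simpa using Nat.le_of_succ_le_succ h)]
            simp
          · have hp : List.isPrefixOf [a] (c :: t) = false := by
              simp [List.isPrefixOf]
              exact fun hh => (hc hh.symm).elim
            simp only [PySem.Chars.replace.go, hp]
            rw [ih t _ (by simpa using Nat.le_of_succ_le_succ h)]
            simp [hc]

theorem replace_single (a b : Char) (cs : List Char) :
    PySem.Chars.replace cs [a] [b] = cs.map (fun c => if c = a then b else c) := by
  unfold PySem.Chars.replace
  simp only [List.isEmpty_cons, if_false, Bool.false_eq_true]
  rw [replace_go_single a b cs.length cs [] le_rfl]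
  simp

theorem str_replace_single (a b : Char) (t : String) :
    PySem.Str.replace t (String.ofList [a]) (String.ofList [b]) =
      String.ofList (t.toList.map fun c => if c = a then b else c) := by
  unfold PySem.Str.replace
  rw [String.toList_ofList, String.toList_ofList, replace_single]

-- A's foldl-append loop computes a map
theorem portA_eq_map (s : String) :
    digit_to_ch s = String.ofList (s.toList.map
      (fun c => if 49 ≤ c.toNat ∧ c.toNat ≤ 57 then Char.ofNat (c.toNat + 16) else c)) := by
  unfold digit_to_ch
  simp only
  refine congrArg String.ofList ?_
  rw [PySem.List.foldl_pyRange_zero_pyGetD' s.toList ' '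
      (fun st c => if 49 ≤ c.toNat ∧ c.toNat ≤ 57 then st ++ [Char.ofNat (c.toNat + 16)] else st ++ [c]) []]
  induction s.toList using List.reverseRecOn with
  | nil => rfl
  | append_singleton xs x ih =>
      rw [List.foldl_append, List.map_append, ih]
      simp only [List.foldl_cons, List.foldl_nil, List.map]
      split_ifs <;> rfl

-- the per-char effect of one staged replace pass
def chStep (c : Char) (d : Int) : Char :=
  if c = Char.ofNat d.toNat then Char.ofNat (d.toNat + 16) else c

-- B's fold of whole-string replaces is one map with the folded per-char function
theorem fold_replace_map (ds : List Int) : ∀ (s : String),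
    ds.foldl (fun t d => PySem.Str.replace t (String.ofList [Char.ofNat d.toNat])
        (String.ofList [Char.ofNat (d.toNat + 16)])) s =
      String.ofList (s.toList.map (fun c => ds.foldl chStep c)) := by
  induction ds with
  | nil => intro s; simp [String.ofList_toList]
  | cons d ds ih =>
      intro s
      rw [List.foldl_cons, ih, str_replace_single, String.toList_ofList, List.map_map]
      refine congrArg String.ofList ?_
      apply List.map_congr_left
      intro c _
      simp only [Function.comp, List.foldl_cons, chStep]

-- folding the nine substitutions over one char equals A's branch
theorem chSteps_eq (c : Char) :
    [(49 : Int), 50, 51, 52, 53, 54, 55, 56, 57].foldl chStep c =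
      (if 49 ≤ c.toNat ∧ c.toNat ≤ 57 then Char.ofNat (c.toNat + 16) else c) := by
  by_cases h : 49 ≤ c.toNat ∧ c.toNat ≤ 57
  · rw [if_pos h]
    obtain ⟨h1, h2⟩ := h
    have hofNat : Char.ofNat c.toNat = c := Char.ofNat_toNat c
    interval_cases hn : c.toNat <;> (rw [← hofNat]; decide)
  · rw [if_neg h]
    have hne : ∀ (k : Int), 49 ≤ k → k ≤ 57 → ¬ c = Char.ofNat k.toNat := by
      intro k hk1 hk2 hck
      have hval : Nat.isValidChar k.toNat := Or.inl (by omega)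
      have hv : (Char.ofNat k.toNat).toNat = k.toNat := by
        simp [Char.ofNat, hval, Char.toNat, Char.ofNatAux]
      exact h ⟨by rw [hck, hv]; omega, by rw [hck, hv]; omega⟩
    simp only [List.foldl_cons, List.foldl_nil, chStep,
      if_neg (hne 49 (by norm_num) (by norm_num)),
      if_neg (hne 50 (by norm_num) (by norm_num)),
      if_neg (hne 51 (by norm_num) (by norm_num)),
      if_neg (hne 52 (by norm_num) (by norm_num)),
      if_neg (hne 53 (by norm_num) (by norm_num)),
      if_neg (hne 54 (by norm_num) (by norm_num)),
      if_neg (hne 55 (by norm_num) (by norm_num)),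
      if_neg (hne 56 (by norm_num) (by norm_num)),
      if_neg (hne 57 (by norm_num) (by norm_num))]

theorem portB_eq_map (s : String) :
    digit_to_ch_alt s = String.ofList (s.toList.map
      (fun c => if 49 ≤ c.toNat ∧ c.toNat ≤ 57 then Char.ofNat (c.toNat + 16) else c)) := by
  unfold digit_to_ch_alt
  rw [show PySem.List.pyRange 49 58 1 = [49, 50, 51, 52, 53, 54, 55, 56, 57] by decide]
  rw [fold_replace_map]
  refine congrArg String.ofList ?_
  apply List.map_congr_left
  intro c _
  exact chSteps_eq c

-- ===== VERDICT =====
theorem digit_to_ch_spec : Claim_equal_digit_to_ch := by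
  intro s _
  unfold Spec_digit_to_ch
  rw [portA_eq_map, portB_eq_map]
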